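-- pv_equiv track=rewrite | github.com/Insta-Bids-System/instabids-v2 | ai-agents/agents/cda/improved_discovery_flow.py | _select_using_tier_strategy
-- ===== SOURCE A (Python) =====
-- from typing import Dict, Any, List
--
-- def _select_using_tier_strategy(contractors: List, target_count: int) -> List:
--     """
--     Select contractors using proper tier distribution
--     Max 5 from Tier 1, Max 10 from Tier 2, Max 15 from Tier 3
--     """
--     tier1 = []
--     tier2 = []
--     tier3 = []
--
--     for contractor in contractors:
--         if contractor.get('discovery_tier') == 1:
--             if len(tier1) < 5:
--                 tier1.append(contractor)
--         elif contractor.get('discovery_tier') == 2: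
--             if len(tier2) < 10:
--                 tier2.append(contractor)
--         else:
--             if len(tier3) < 15:
--                 tier3.append(contractor)
--
--     # Combine in priority order
--     selected = tier1 + tier2 + tier3
--
--     return selected[:target_count]
-- ===== SOURCE B (Python) =====
-- def _select_using_tier_strategy(contractors, target_count):
--     # Stable-sort by tier priority, then one scan decrementing per-tier budgets.
--     def prio(c):
--         t = c.get('discovery_tier')
--         return 0 if t == 1 else (1 if t == 2 else 2)
--     caps = [5, 10, 15]
--     selected = []
--     for c in sorted(contractors, key=prio):
--         p = prio(c)
--         if caps[p] > 0:
--             caps[p] -= 1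
--             selected.append(c)
--     return selected[:target_count]
-- ===== Notes on version B (the rewrite author's own statement) =====
-- stated objective: alternative
-- what changed: Instead of bucketing into three capped accumulator lists and concatenating, B stable-sorts the contractors by a tier-priority key and makes one scan over the sorted list, decrementing a per-tier budget array; stability of the sort makes the output order identical.
import Mathlib
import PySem

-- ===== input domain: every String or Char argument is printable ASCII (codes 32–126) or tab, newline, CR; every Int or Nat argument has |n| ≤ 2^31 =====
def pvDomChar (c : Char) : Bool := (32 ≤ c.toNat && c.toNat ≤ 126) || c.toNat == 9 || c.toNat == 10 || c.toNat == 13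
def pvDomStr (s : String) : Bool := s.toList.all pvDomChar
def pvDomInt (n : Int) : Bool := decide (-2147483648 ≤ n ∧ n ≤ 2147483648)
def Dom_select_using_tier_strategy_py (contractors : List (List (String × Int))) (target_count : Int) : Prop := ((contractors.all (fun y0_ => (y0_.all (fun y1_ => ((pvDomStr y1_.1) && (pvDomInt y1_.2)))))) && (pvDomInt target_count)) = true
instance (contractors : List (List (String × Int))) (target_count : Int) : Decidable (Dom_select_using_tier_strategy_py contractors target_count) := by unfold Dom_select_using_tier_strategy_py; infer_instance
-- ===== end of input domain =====

-- B replaces A's single bucketing loop (three capped accumulator lists) by a stable sort on a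
-- tier-priority key followed by one scan that decrements per-tier budgets; objective: alternative.

-- ===== PORT A =====
-- contractor.get('discovery_tier') : first-match dict lookup
def pvGetTier (c : List (String × Int)) : Option Int := (PySem.Dict.mk c).get? "discovery_tier"

-- the for-loop: three capped accumulators, appended in order
def pvSelStep (acc : List (List (String × Int)) × List (List (String × Int)) × List (List (String × Int)))
    (c : List (String × Int)) :
    List (List (String × Int)) × List (List (String × Int)) × List (List (String × Int)) :=
  let (t1, t2, t3) := acc
  if pvGetTier c = some 1 then
    (if t1.length < 5 then (t1 ++ [c], t2, t3) else acc)
  else if pvGetTier c = some 2 then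
    (if t2.length < 10 then (t1, t2 ++ [c], t3) else acc)
  else
    (if t3.length < 15 then (t1, t2, t3 ++ [c]) else acc)

def select_using_tier_strategy_py (contractors : List (List (String × Int))) (target_count : Int) : List (List (String × Int)) :=
  let r := contractors.foldl pvSelStep ([], [], [])
  let selected := r.1 ++ r.2.1 ++ r.2.2
  PySem.List.slice selected none (some target_count)

-- ===== PORT B =====
-- prio(c): 0 if tier 1, 1 if tier 2, else 2
def pvPrio (c : List (String × Int)) : Int :=
  if pvGetTier c = some 1 then 0 else if pvGetTier c = some 2 then 1 else 2

-- one loop step: p = prio(c); if caps[p] > 0: caps[p] -= 1; selected.append(c)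
-- (p is always 0, 1 or 2, so caps[p] is in range; .toNat is exact here since p ≥ 0)
def pvScanStep (st : List Int × List (List (String × Int))) (c : List (String × Int)) :
    List Int × List (List (String × Int)) :=
  let p := pvPrio c
  if st.1.getD p.toNat 0 > 0 then
    (st.1.set p.toNat (st.1.getD p.toNat 0 - 1), st.2 ++ [c])
  else st

def select_using_tier_strategy_py_alt (contractors : List (List (String × Int))) (target_count : Int) : List (List (String × Int)) :=
  let ordered := PySem.List.sorted contractors pvPrio
  let r := ordered.foldl pvScanStep ([5, 10, 15], [])
  PySem.List.slice r.2 none (some target_count)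

-- ===== PRECONDITION & SPEC =====
def Spec_select_using_tier_strategy_py (contractors : List (List (String × Int))) (target_count : Int) (out : List (List (String × Int))) : Prop := out = select_using_tier_strategy_py_alt contractors target_count
instance (contractors : List (List (String × Int))) (target_count : Int) (out : List (List (String × Int))) : Decidable (Spec_select_using_tier_strategy_py contractors target_count out) := by unfold Spec_select_using_tier_strategy_py; infer_instance

-- ===== CLAIM (what is proved, stated in full; the proofs are below) =====
def Claim_equal_select_using_tier_strategy_py : Prop := ∀ (contractors : List (List (String × Int))) (target_count : Int), Dom_select_using_tier_strategy_py contractors target_count → Spec_select_using_tier_strategy_py contractors target_count (select_using_tier_strategy_py contractors target_count)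

-- ===== LEMMAS AND PROOFS =====

-- A-side loop invariant: the fold extends each accumulator with the capped filtered remainder
theorem pvSelLoop_eq (cs : List (List (String × Int)))
    (t1 t2 t3 : List (List (String × Int))) :
    cs.foldl pvSelStep (t1, t2, t3) =
      (t1 ++ (cs.filter (fun c => pvPrio c = 0)).take (5 - t1.length),
       t2 ++ (cs.filter (fun c => pvPrio c = 1)).take (10 - t2.length),
       t3 ++ (cs.filter (fun c => pvPrio c = 2)).take (15 - t3.length)) := by
  induction cs generalizing t1 t2 t3 with
  | nil => simp
  | cons c cs ih =>
    by_cases h1 : pvGetTier c = some 1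
    · have hp : pvPrio c = 0 := by simp [pvPrio, h1]
      by_cases hl : t1.length < 5
      · simp only [List.foldl_cons, pvSelStep, h1, if_pos hl, if_pos, ih]
        have : 5 - t1.length = (5 - (t1 ++ [c]).length) + 1 := by
          simp only [List.length_append, List.length_cons, List.length_nil]; omega
        simp [hp, this, List.take_succ_cons]
      · have h5 : 5 - t1.length = 0 := by omega
        simp only [List.foldl_cons, pvSelStep, h1, if_pos, if_neg hl, ih]
        simp [hp, h5]
    · by_cases h2 : pvGetTier c = some 2
      · have hp : pvPrio c = 1 := by simp [pvPrio, h2]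
        by_cases hl : t2.length < 10
        · simp only [List.foldl_cons, pvSelStep, h2, if_pos hl, ih]
          have : 10 - t2.length = (10 - (t2 ++ [c]).length) + 1 := by
            simp only [List.length_append, List.length_cons, List.length_nil]; omega
          simp [hp, this, List.take_succ_cons]
        · have h10 : 10 - t2.length = 0 := by omega
          simp only [List.foldl_cons, pvSelStep, if_neg h1, if_pos h2, if_neg hl, ih]
          simp [hp, h10]
      · have hp : pvPrio c = 2 := by simp [pvPrio, h1, h2]
        by_cases hl : t3.length < 15
        · simp only [List.foldl_cons, pvSelStep, if_neg h1, if_neg h2, if_pos hl, ih]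
          have : 15 - t3.length = (15 - (t3 ++ [c]).length) + 1 := by
            simp only [List.length_append, List.length_cons, List.length_nil]; omega
          simp [hp, this, List.take_succ_cons]
        · have h15 : 15 - t3.length = 0 := by omega
          simp only [List.foldl_cons, pvSelStep, if_neg h1, if_neg h2, if_neg hl, ih]
          simp [hp, h15]

-- insertBy places x after every element it is not 'before' and before the rest
theorem pvInsertBy_between {α : Type} (before : α → α → Bool) (x : α) (l r : List α)
    (hl : ∀ y ∈ l, before x y = false) (hr : ∀ y ∈ r, before x y = true) :
    PySem.List.insertBy before x (l ++ r) = l ++ x :: r := by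
  induction l with
  | nil =>
    cases r with
    | nil => rfl
    | cons y ys => simp [PySem.List.insertBy, hr y (by simp)]
  | cons a l ih =>
    have ha : before x a = false := hl a (by simp)
    simp only [List.cons_append, PySem.List.insertBy, ha]
    simp [ih (fun y hy => hl y (by simp [hy]))]

-- the stable sort on the 3-valued priority key is exactly the three filters concatenated
theorem pvSorted_eq_groups (xs : List (List (String × Int))) :
    PySem.List.sorted xs pvPrio =
      xs.filter (fun c => pvPrio c = 0) ++ xs.filter (fun c => pvPrio c = 1) ++
        xs.filter (fun c => pvPrio c = 2) := by
  rw [PySem.List.sorted_eq_foldl_insertBy]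
  suffices h : ∀ (g0 g1 g2 : List (List (String × Int))),
      (∀ c ∈ g0, pvPrio c = 0) → (∀ c ∈ g1, pvPrio c = 1) → (∀ c ∈ g2, pvPrio c = 2) →
      xs.foldl (fun acc x => PySem.List.insertBy (fun a b => decide (pvPrio a < pvPrio b)) x acc)
          (g0 ++ g1 ++ g2) =
        (g0 ++ xs.filter (fun c => pvPrio c = 0)) ++ (g1 ++ xs.filter (fun c => pvPrio c = 1)) ++
          (g2 ++ xs.filter (fun c => pvPrio c = 2)) by
    simpa using h [] [] [] (by simp) (by simp) (by simp)
  induction xs with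
  | nil => intro g0 g1 g2 _ _ _; simp
  | cons c cs ih =>
    intro g0 g1 g2 h0 h1 h2
    have hcase : pvPrio c = 0 ∨ pvPrio c = 1 ∨ pvPrio c = 2 := by
      unfold pvPrio; split_ifs <;> simp
    simp only [List.foldl_cons]
    rcases hcase with hp | hp | hp
    · have hins : PySem.List.insertBy (fun a b => decide (pvPrio a < pvPrio b)) c (g0 ++ g1 ++ g2)
          = g0 ++ c :: (g1 ++ g2) := by
        rw [List.append_assoc]
        exact pvInsertBy_between _ c g0 (g1 ++ g2)
          (fun y hy => by simp [hp, h0 y hy])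
          (fun y hy => by
            rcases List.mem_append.mp hy with hy | hy
            · simp [hp, h1 y hy]
            · simp [hp, h2 y hy])
      have hinit : g0 ++ c :: (g1 ++ g2) = (g0 ++ [c]) ++ g1 ++ g2 := by simp
      rw [hins, hinit, ih (g0 ++ [c]) g1 g2
        (fun y hy => by rcases List.mem_append.mp hy with hy | hy
                        · exact h0 y hy
                        · simp at hy; simpa [hy] using hp) h1 h2]
      simp [hp, List.append_assoc]
    · have hins : PySem.List.insertBy (fun a b => decide (pvPrio a < pvPrio b)) c (g0 ++ g1 ++ g2)
          = (g0 ++ g1) ++ c :: g2 := by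
        exact pvInsertBy_between _ c (g0 ++ g1) g2
          (fun y hy => by
            rcases List.mem_append.mp hy with hy | hy
            · simp [hp, h0 y hy]
            · simp [hp, h1 y hy])
          (fun y hy => by simp [hp, h2 y hy])
      have hinit : (g0 ++ g1) ++ c :: g2 = g0 ++ (g1 ++ [c]) ++ g2 := by simp
      rw [hins, hinit, ih g0 (g1 ++ [c]) g2 h0
        (fun y hy => by rcases List.mem_append.mp hy with hy | hy
                        · exact h1 y hy
                        · simp at hy; simpa [hy] using hp) h2]
      simp [hp, List.append_assoc]
    · have hins : PySem.List.insertBy (fun a b => decide (pvPrio a < pvPrio b)) c (g0 ++ g1 ++ g2)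
          = (g0 ++ g1 ++ g2) ++ [c] := by
        apply PySem.List.insertBy_of_forall_not_before
        intro y hy
        rcases List.mem_append.mp hy with hy | hy
        · rcases List.mem_append.mp hy with hy | hy
          · simp [hp, h0 y hy]
          · simp [hp, h1 y hy]
        · simp [hp, h2 y hy]
      have hinit : (g0 ++ g1 ++ g2) ++ [c] = g0 ++ g1 ++ (g2 ++ [c]) := by simp
      rw [hins, hinit, ih g0 g1 (g2 ++ [c]) h0 h1
        (fun y hy => by rcases List.mem_append.mp hy with hy | hy
                        · exact h2 y hy
                        · simp at hy; simpa [hy] using hp)]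
      simp [hp, List.append_assoc]

-- B-side scan over a block of priority-0 elements
theorem pvScan0 (g : List (List (String × Int))) (hg : ∀ c ∈ g, pvPrio c = 0)
    (a b k : Int) (ha : 0 ≤ a) (out : List (List (String × Int))) :
    g.foldl pvScanStep ([a, b, k], out) =
      ([a - min a g.length, b, k], out ++ g.take a.toNat) := by
  induction g generalizing a out with
  | nil => simp; omega
  | cons c g ih =>
    have hp : pvPrio c = 0 := hg c (by simp)
    have hg' : ∀ c ∈ g, pvPrio c = 0 := fun c hc => hg c (by simp [hc])
    by_cases hpos : a > 0
    · have h1 : a.toNat = (a - 1).toNat + 1 := by omega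
      have hstep : pvScanStep ([a, b, k], out) c = ([a - 1, b, k], out ++ [c]) := by
        simp [pvScanStep, hp, hpos]
      rw [List.foldl_cons, hstep, ih hg' (a - 1) (by omega) (out ++ [c])]
      simp only [Prod.mk.injEq]
      refine ⟨?_, ?_⟩
      · have : a - min a (↑g.length + 1) = a - 1 - min (a - 1) ↑g.length := by omega
        simp only [List.length_cons]
        push_cast
        rw [this]
      · rw [h1, List.take_succ_cons]
        simp
    · have ha0 : a = 0 := by omega
      have hstep : pvScanStep ([a, b, k], out) c = ([a, b, k], out) := by
        simp [pvScanStep, hp, hpos]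
      rw [List.foldl_cons, hstep, ih hg' a ha out]
      simp only [Prod.mk.injEq]
      refine ⟨?_, ?_⟩
      · simp only [List.length_cons, List.cons.injEq, and_true]
        push_cast
        omega
      · simp [ha0]
-- B-side scan over a block of priority-1 elements
theorem pvScan1 (g : List (List (String × Int))) (hg : ∀ c ∈ g, pvPrio c = 1)
    (a b k : Int) (hb : 0 ≤ b) (out : List (List (String × Int))) :
    g.foldl pvScanStep ([a, b, k], out) =
      ([a, b - min b g.length, k], out ++ g.take b.toNat) := by
  induction g generalizing b out with
  | nil => simp; omega
  | cons c g ih =>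
    have hp : pvPrio c = 1 := hg c (by simp)
    have hg' : ∀ c ∈ g, pvPrio c = 1 := fun c hc => hg c (by simp [hc])
    by_cases hpos : b > 0
    · have h1 : b.toNat = (b - 1).toNat + 1 := by omega
      have hstep : pvScanStep ([a, b, k], out) c = ([a, b - 1, k], out ++ [c]) := by
        simp [pvScanStep, hp, hpos]
      rw [List.foldl_cons, hstep, ih hg' (b - 1) (by omega) (out ++ [c])]
      simp only [Prod.mk.injEq]
      refine ⟨?_, ?_⟩
      · have : b - min b (↑g.length + 1) = b - 1 - min (b - 1) ↑g.length := by omega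
        simp only [List.length_cons]
        push_cast
        rw [this]
      · rw [h1, List.take_succ_cons]
        simp
    · have hb0 : b = 0 := by omega
      have hstep : pvScanStep ([a, b, k], out) c = ([a, b, k], out) := by
        simp [pvScanStep, hp, hpos]
      rw [List.foldl_cons, hstep, ih hg' b hb out]
      simp only [Prod.mk.injEq]
      refine ⟨?_, ?_⟩
      · simp only [List.length_cons, List.cons.injEq, and_true]
        push_cast
        simp only [true_and]
        omega
      · simp [hb0]
-- B-side scan over a block of priority-2 elements
theorem pvScan2 (g : List (List (String × Int))) (hg : ∀ c ∈ g, pvPrio c = 2)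
    (a b k : Int) (hk : 0 ≤ k) (out : List (List (String × Int))) :
    g.foldl pvScanStep ([a, b, k], out) =
      ([a, b, k - min k g.length], out ++ g.take k.toNat) := by
  induction g generalizing k out with
  | nil => simp; omega
  | cons c g ih =>
    have hp : pvPrio c = 2 := hg c (by simp)
    have hg' : ∀ c ∈ g, pvPrio c = 2 := fun c hc => hg c (by simp [hc])
    by_cases hpos : k > 0
    · have h1 : k.toNat = (k - 1).toNat + 1 := by omega
      have hstep : pvScanStep ([a, b, k], out) c = ([a, b, k - 1], out ++ [c]) := by
        simp [pvScanStep, hp, hpos]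
      rw [List.foldl_cons, hstep, ih hg' (k - 1) (by omega) (out ++ [c])]
      simp only [Prod.mk.injEq]
      refine ⟨?_, ?_⟩
      · have : k - min k (↑g.length + 1) = k - 1 - min (k - 1) ↑g.length := by omega
        simp only [List.length_cons]
        push_cast
        rw [this]
      · rw [h1, List.take_succ_cons]
        simp
    · have hk0 : k = 0 := by omega
      have hstep : pvScanStep ([a, b, k], out) c = ([a, b, k], out) := by
        simp [pvScanStep, hp, hpos]
      rw [List.foldl_cons, hstep, ih hg' k hk out]
      simp only [Prod.mk.injEq]
      refine ⟨?_, ?_⟩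
      · simp only [List.length_cons, List.cons.injEq, and_true]
        push_cast
        simp only [true_and]
        omega
      · simp [hk0]

-- ===== VERDICT (by name: the statement is the Claim_ definition above) =====
theorem select_using_tier_strategy_py_spec : Claim_equal_select_using_tier_strategy_py := by
  intro contractors target_count _
  unfold Spec_select_using_tier_strategy_py select_using_tier_strategy_py select_using_tier_strategy_py_alt
  simp only [pvSelLoop_eq, pvSorted_eq_groups, List.foldl_append]
  rw [pvScan0 _ (fun c hc => by simpa using (List.mem_filter.mp hc).2) 5 10 15 (by norm_num) []]
  rw [pvScan1 _ (fun c hc => by simpa using (List.mem_filter.mp hc).2) _ 10 15 (by norm_num) _]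
  rw [pvScan2 _ (fun c hc => by simpa using (List.mem_filter.mp hc).2) _ _ 15 (by norm_num) _]
  simp
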